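-- pv_equiv track=rewrite | github.com/sdeery14/personal-ai-assistant | eval/memory_write_judge.py | count_false_positives
-- ===== SOURCE A (Python) =====
-- def count_false_positives(
--
--     actual_writes: list[str],
--     expected_keywords: list[list[str]],
-- ) -> int:
--     """Count false positive writes (writes with no matching expected action).
--
--     Args:
--         actual_writes: List of actual memory contents written
--         expected_keywords: List of keyword lists from expected actions
--
--     Returns:
--         Number of false positive writes
--     """
--     if not actual_writes:
--         return 0
--
--     # Flatten all expected keywords
--     all_expected = set()
--     for kw_list in expected_keywords:
--         for kw in kw_list:
--             all_expected.add(kw.lower())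
--
--     false_positives = 0
--     for write in actual_writes:
--         write_lower = write.lower()
--         if not any(kw in write_lower for kw in all_expected):
--             false_positives += 1
--
--     return false_positives
-- ===== SOURCE B (Python) =====
-- def count_false_positives(
--     actual_writes: list[str],
--     expected_keywords: list[list[str]],
-- ) -> int:
--     """Count writes containing none of the expected keywords (case-insensitive).
--
--     Instead of testing every keyword against every write, keep the list of
--     still-unmatched (lowercased) writes and strike out, keyword by keyword,
--     every write containing that keyword; the survivors are the false positives.
--     """
--     unmatched = [w.lower() for w in actual_writes]
--     for kw_list in expected_keywords:
--         for kw in kw_list: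
--             k = kw.lower()
--             unmatched = [w for w in unmatched if k not in w]
--     return len(unmatched)
-- ===== Notes on version B (the rewrite author's own statement) =====
-- stated objective: faster
-- what changed: B replaces A's flatten-keywords-into-a-set-then-scan-every-keyword-per-write approach by keyword-driven elimination: it keeps the list of still-unmatched lowercased writes and filters out, keyword by keyword, every write containing it, so a write matched by an early keyword is never scanned against later keywords.
import Mathlib
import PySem

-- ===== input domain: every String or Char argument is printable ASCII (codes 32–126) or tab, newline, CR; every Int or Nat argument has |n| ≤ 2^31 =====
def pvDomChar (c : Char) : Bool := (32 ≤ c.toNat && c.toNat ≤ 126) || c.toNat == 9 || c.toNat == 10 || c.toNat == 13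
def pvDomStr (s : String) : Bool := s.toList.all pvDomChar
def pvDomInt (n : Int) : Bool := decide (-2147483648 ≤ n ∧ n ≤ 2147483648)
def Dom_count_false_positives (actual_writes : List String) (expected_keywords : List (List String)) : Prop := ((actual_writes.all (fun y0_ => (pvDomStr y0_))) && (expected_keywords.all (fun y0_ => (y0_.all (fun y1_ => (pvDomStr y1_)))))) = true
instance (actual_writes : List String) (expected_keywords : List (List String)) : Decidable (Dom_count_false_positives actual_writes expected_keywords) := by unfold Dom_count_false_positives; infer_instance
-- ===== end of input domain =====

-- B eliminates writes keyword-by-keyword from a shrinking list instead of scanning a keyword set per write; return values proved equal on all inputs.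
-- ===== PORT A =====
def count_false_positives (actual_writes : List String) (expected_keywords : List (List String)) : Int :=
  if actual_writes = [] then 0
  else
    let all_expected : PySem.Set String :=
      expected_keywords.foldl (fun s kw_list =>
        kw_list.foldl (fun s kw => PySem.Set.add s (PySem.Str.lower kw)) s) PySem.Set.empty
    actual_writes.foldl (fun false_positives write =>
      let write_lower := PySem.Str.lower write
      if all_expected.any (fun kw => PySem.Str.isIn kw write_lower) then false_positives
      else false_positives + 1) 0

-- ===== PORT B =====
def count_false_positives_alt (actual_writes : List String) (expected_keywords : List (List String)) : Int :=
  let init := actual_writes.map PySem.Str.lower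
  let final := expected_keywords.foldl (fun unmatched kw_list =>
    kw_list.foldl (fun unmatched kw =>
      unmatched.filter (fun w => !PySem.Str.isIn (PySem.Str.lower kw) w)) unmatched) init
  (final.length : Int)

-- ===== PRECONDITION & SPEC =====
def Spec_count_false_positives (actual_writes : List String) (expected_keywords : List (List String)) (out : Int) : Prop := out = count_false_positives_alt actual_writes expected_keywords
instance (actual_writes : List String) (expected_keywords : List (List String)) (out : Int) : Decidable (Spec_count_false_positives actual_writes expected_keywords out) := by unfold Spec_count_false_positives; infer_instance

-- ===== CLAIM (what is proved, stated in full; the proofs are below) =====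
def Claim_equal_count_false_positives : Prop := ∀ (actual_writes : List String) (expected_keywords : List (List String)), Dom_count_false_positives actual_writes expected_keywords → Spec_count_false_positives actual_writes expected_keywords (count_false_positives actual_writes expected_keywords)

-- ===== LEMMAS AND PROOFS =====

-- ===== VERDICT (by name: the statement is the Claim_ definition above) =====
-- B's nested filtering fold computes one big filter over the flattened keyword list
lemma filter_fold_inner (kl : List String) (un : List String) :
    kl.foldl (fun unmatched kw =>
      unmatched.filter (fun w => !PySem.Str.isIn (PySem.Str.lower kw) w)) un
    = un.filter (fun w => kl.all (fun kw => !PySem.Str.isIn (PySem.Str.lower kw) w)) := by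
  induction kl generalizing un with
  | nil => simp
  | cons k t ih =>
    rw [List.foldl_cons, ih, List.filter_filter]
    exact List.filter_congr (fun w _ => by
      simp only [List.all_cons]
      cases PySem.Str.isIn (PySem.Str.lower k) w <;> simp)

lemma filter_fold_outer (ek : List (List String)) (un : List String) :
    ek.foldl (fun unmatched kw_list =>
      kw_list.foldl (fun unmatched kw =>
        unmatched.filter (fun w => !PySem.Str.isIn (PySem.Str.lower kw) w)) unmatched) un
    = un.filter (fun w => ek.all (fun kl => kl.all (fun kw => !PySem.Str.isIn (PySem.Str.lower kw) w))) := by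
  induction ek generalizing un with
  | nil => simp
  | cons kl t ih =>
    rw [List.foldl_cons, ih, filter_fold_inner, List.filter_filter]
    exact List.filter_congr (fun w _ => by
      simp only [List.all_cons]
      cases h : kl.all (fun kw => !PySem.Str.isIn (PySem.Str.lower kw) w) <;> simp_all)

-- membership in A's keyword set
lemma mem_kw_set (ek : List (List String)) (s : PySem.Set String) (y : String) :
    y ∈ ek.foldl (fun s kw_list =>
        kw_list.foldl (fun s kw => PySem.Set.add s (PySem.Str.lower kw)) s) s
    ↔ y ∈ s ∨ ∃ kl ∈ ek, ∃ kw ∈ kl, y = PySem.Str.lower kw := by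
  induction ek generalizing s with
  | nil => simp
  | cons kl t ih =>
    simp only [List.foldl_cons, ih, PySem.Set.mem_foldl_add, List.mem_cons]
    constructor
    · rintro (⟨h | ⟨kw, hkw, rfl⟩⟩ | ⟨l, hl, kw, hkw, rfl⟩)
      · exact Or.inl h
      · exact Or.inr ⟨kl, Or.inl rfl, kw, hkw, rfl⟩
      · exact Or.inr ⟨l, Or.inr hl, kw, hkw, rfl⟩
    · rintro (h | ⟨l, hl | hl, kw, hkw, rfl⟩)
      · exact Or.inl (Or.inl h)
      · exact Or.inl (Or.inr ⟨kw, hl ▸ hkw, rfl⟩)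
      · exact Or.inr ⟨l, hl, kw, hkw, rfl⟩

-- per-write: A's "some set element occurs in the write" = B's "some keyword occurs"
lemma match_iff (ek : List (List String)) (w : String) :
    ((ek.foldl (fun s kw_list =>
        kw_list.foldl (fun s kw => PySem.Set.add s (PySem.Str.lower kw)) s)
        PySem.Set.empty).any (fun kw => PySem.Str.isIn kw w))
    = !(ek.all (fun kl => kl.all (fun kw => !PySem.Str.isIn (PySem.Str.lower kw) w))) := by
  rcases h : ek.all (fun kl => kl.all (fun kw => !PySem.Str.isIn (PySem.Str.lower kw) w)) with _ | _
  · rw [Bool.not_false]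
    simp only [List.all_eq_false, Bool.not_eq_true, Bool.not_eq_false'] at h
    obtain ⟨kl, hkl, kw, hkw, hin⟩ := h
    simp only [List.any_eq_true]
    exact ⟨PySem.Str.lower kw, (mem_kw_set ek PySem.Set.empty _).2 (Or.inr ⟨kl, hkl, kw, hkw, rfl⟩), hin⟩
  · rw [Bool.not_true]
    simp only [List.all_eq_true] at h
    rw [List.any_eq_false]
    rintro x hx
    rcases (mem_kw_set ek PySem.Set.empty x).1 hx with h' | ⟨kl, hkl, kw, hkw, rfl⟩
    · simp [PySem.Set.empty] at h'
    · simpa using h kl hkl kw hkw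

lemma count_loop (c : String → Bool) (l : List String) (a : Int) :
    l.foldl (fun fp w => if c w then fp else fp + 1) a = a + (l.countP (fun w => !c w) : Int) := by
  have : (fun (fp : Int) w => if c w then fp else fp + 1)
       = (fun fp w => if (!c w) = true then fp + 1 else fp) := by
    funext fp w; cases c w <;> simp
  rw [this, PySem.List.foldl_if_add_one]

-- ===== VERDICT (by name: the statement is the Claim_ definition above) =====
theorem count_false_positives_spec : Claim_equal_count_false_positives := by
  intro aw ek _
  show count_false_positives aw ek = count_false_positives_alt aw ek
  simp only [count_false_positives, count_false_positives_alt, filter_fold_outer]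
  by_cases haw : aw = []
  · simp [haw]
  · simp only [if_neg haw]
    rw [count_loop, List.filter_map, List.length_map, ← List.countP_eq_length_filter, Int.zero_add,
      Int.natCast_inj]
    apply List.countP_congr
    intro w _
    simp only [Function.comp_apply, match_iff, Bool.not_not]
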